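-- pv_equiv track=rewrite | github.com/mgls23/Euler | solutions/p115.py | dp_variable_min
-- ===== SOURCE A (Python) =====
-- def dp_variable_min(total_blocks, minimum_block_size):
-- 	""" This is just p114 but with variable minimum_block size
-- 	Minor adjustments have been made
-- 	"""
-- 	starts_1, starts_non_1 = 0, 1
-- 	results = [[0, 0]]
--
-- 	# Adjustment 1 ::
-- 	for _ in range(minimum_block_size - 1):
-- 		results.append([1, 0])
--
-- 	for _ in range(total_blocks - len(results) + 1):
-- 		results.append([])
--
-- 	def helper(blocks):
-- 		if not results[blocks]:
-- 			result_minus_1 = helper(blocks - 1)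
-- 			results[blocks] = [
-- 				result_minus_1[starts_1] + result_minus_1[starts_non_1],  # starts_1
-- 				1,  # starts_non_1: start with [blocks]
-- 			]
--
-- 			# Adjustment 2 ::
-- 			for block in range(minimum_block_size, blocks + 1):
-- 				result_minus_block = helper(blocks - block)
-- 				results[blocks][starts_non_1] += result_minus_block[starts_1]
--
-- 		return results[blocks]
--
-- 	return sum(helper(total_blocks))
-- ===== SOURCE B (Python) =====
-- def dp_variable_min(total_blocks, minimum_block_size):
--     """Bottom-up O(n) pass: keep a running prefix sum of the starts_1 column
--     instead of re-scanning all smaller block sizes for every length."""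
--     m = minimum_block_size
--     if total_blocks < m:
--         return 0 if total_blocks == 0 else 1
--     s1 = [0] + [1] * (m - 1)          # starts_1 values for lengths 0..m-1
--     prev_s1 = s1[m - 1]
--     prev_sn = 0
--     prefix = 0                        # sum of s1[0..b-m]
--     for b in range(m, total_blocks + 1):
--         cur_s1 = prev_s1 + prev_sn
--         prefix += s1[b - m]
--         cur_sn = 1 + prefix
--         s1.append(cur_s1)
--         prev_s1, prev_sn = cur_s1, cur_sn
--     return prev_s1 + prev_sn
-- ===== Notes on version B (the rewrite author's own statement) =====
-- stated objective: faster
-- what changed: Replaces the memoised recursion with a quadratic inner loop over all block sizes by a single bottom-up pass that maintains a running prefix sum of the starts_1 column, so each length costs O(1).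
-- intended difference: For total_blocks = -minimum_block_size (an unspecified corner), A's negative-index wraparound reads the length-0 table entry and returns 0, while B returns 1 as it does for every other total_blocks below minimum_block_size; B's uniform choice is the intended one for this unreachable corner. — e.g. on dp_variable_min(-1, 1): A returns 0, B returns 1
-- outside the precondition, e.g. on dp_variable_min(2, 0): A returns 3, B returns 4; on dp_variable_min(0, -2): A returns 0, B raises IndexError; on dp_variable_min(-5, 3): A raises IndexError, B returns 1
import Mathlib
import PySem

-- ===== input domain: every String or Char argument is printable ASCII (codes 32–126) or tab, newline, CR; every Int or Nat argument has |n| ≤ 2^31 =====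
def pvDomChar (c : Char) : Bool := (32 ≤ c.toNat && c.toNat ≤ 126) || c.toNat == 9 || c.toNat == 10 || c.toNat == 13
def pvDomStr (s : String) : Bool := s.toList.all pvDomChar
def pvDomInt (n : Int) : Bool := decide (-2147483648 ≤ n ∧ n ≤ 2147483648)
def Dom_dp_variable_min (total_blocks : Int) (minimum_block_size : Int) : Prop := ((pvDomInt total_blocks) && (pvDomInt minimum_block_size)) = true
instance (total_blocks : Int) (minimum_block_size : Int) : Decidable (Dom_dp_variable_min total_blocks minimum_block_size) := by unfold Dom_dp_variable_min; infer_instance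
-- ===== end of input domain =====

-- B replaces A's memoised recursion (inner loop over every block size: O(n^2)) by one
-- bottom-up pass keeping a running prefix sum of the starts_1 column (O(n)).

-- ===== PORT A =====
-- memoised helper: the results table is passed as state; fuel only makes the Python
-- recursion structural (it is never exhausted on inputs where the Python returns)
def pvHelperA (m : Int) : Nat → List (List Int) → Int → Option (List (List Int) × List Int)
  | 0, _, _ => none
  | fuel + 1, st, blocks =>
    match PySem.List.pyGet? st blocks with
    | none => none                      -- IndexError
    | some entry =>
      if entry.isEmpty then
        match pvHelperA m fuel st (blocks - 1) with
        | none => none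
        | some (st1, rm1) =>
          let st2 := PySem.List.pySetD st1 blocks
            [PySem.List.pyGetD rm1 0 0 + PySem.List.pyGetD rm1 1 0, 1]
          match (PySem.List.pyRange m (blocks + 1) 1).foldl
              (fun acc block =>
                match acc with
                | none => none
                | some st' =>
                  match pvHelperA m fuel st' (blocks - block) with
                  | none => none
                  | some (st'', rb) =>
                    match PySem.List.pyGet? st'' blocks with
                    | none => none
                    | some cur =>
                      some (PySem.List.pySetD st'' blocks
                        [PySem.List.pyGetD cur 0 0,
                         PySem.List.pyGetD cur 1 0 + PySem.List.pyGetD rb 0 0]))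
              (some st2) with
          | none => none
          | some stf =>
            match PySem.List.pyGet? stf blocks with
            | none => none
            | some e => some (stf, e)
      else some (st, entry)

def dp_variable_min (total_blocks : Int) (minimum_block_size : Int) : Int :=
  let results0 : List (List Int) := [[0, 0]]
  let results1 := (PySem.List.pyRange 0 (minimum_block_size - 1) 1).foldl
      (fun acc _ => acc ++ [[1, 0]]) results0
  let results2 := (PySem.List.pyRange 0 (total_blocks - (results1.length : Int) + 1) 1).foldl
      (fun acc _ => acc ++ [([] : List Int)]) results1
  match pvHelperA minimum_block_size (total_blocks.toNat + 2) results2 total_blocks with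
  | some (_, e) => e.foldl (· + ·) 0
  | none => 0

-- ===== PORT B =====
def dp_variable_min_alt (total_blocks : Int) (minimum_block_size : Int) : Int :=
  if total_blocks < minimum_block_size then
    (if total_blocks = 0 then 0 else 1)
  else
    let s1 : List Int := [0] ++ List.replicate (minimum_block_size - 1).toNat 1
    let st := (PySem.List.pyRange minimum_block_size (total_blocks + 1) 1).foldl
      (fun (st : List Int × Int × Int × Int) b =>
        let cur_s1 := st.2.1 + st.2.2.1
        let pref := st.2.2.2 + PySem.List.pyGetD st.1 (b - minimum_block_size) 0
        let cur_sn := 1 + pref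
        (st.1 ++ [cur_s1], cur_s1, cur_sn, pref))
      (s1, PySem.List.pyGetD s1 (minimum_block_size - 1) 0, 0, 0)
    st.2.1 + st.2.2.1

-- ===== PRECONDITION & SPEC =====
-- Pre_ excludes minimum_block_size ≤ 0, where A raises IndexError or (at total_blocks ∈ {-1,0},
-- or minimum_block_size = 0) returns values read from a partially built memo entry mid-update,
-- and total_blocks < -minimum_block_size, where A raises IndexError.
def Pre_dp_variable_min (total_blocks : Int) (minimum_block_size : Int) : Prop :=
  1 ≤ minimum_block_size ∧ -minimum_block_size ≤ total_blocks
instance (total_blocks : Int) (minimum_block_size : Int) : Decidable (Pre_dp_variable_min total_blocks minimum_block_size) := by unfold Pre_dp_variable_min; infer_instance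
def pvWitness_dp_variable_min : Int × Int := (10, 3)

-- For total_blocks = -minimum_block_size (an unspecified corner), A's negative-index wraparound
-- reads the length-0 table entry and returns 0, while B returns 1 as for every other
-- total_blocks below minimum_block_size; B's uniform choice is the intended one.
def D_dp_variable_min (total_blocks : Int) (minimum_block_size : Int) : Prop :=
  total_blocks = -minimum_block_size
instance (total_blocks : Int) (minimum_block_size : Int) : Decidable (D_dp_variable_min total_blocks minimum_block_size) := by unfold D_dp_variable_min; infer_instance

def Spec_dp_variable_min (total_blocks : Int) (minimum_block_size : Int) (out : Int) : Prop := ¬ D_dp_variable_min total_blocks minimum_block_size → out = dp_variable_min_alt total_blocks minimum_block_size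
instance (total_blocks : Int) (minimum_block_size : Int) (out : Int) : Decidable (Spec_dp_variable_min total_blocks minimum_block_size out) := by unfold Spec_dp_variable_min; infer_instance

def pvDiffWitness_dp_variable_min : Int × Int := (-1, 1)
def pvDiffWitnessOut_dp_variable_min : Int × Int := (0, 1)

-- ===== CLAIM (what is proved, stated in full; the proofs are below) =====
def Claim_unchanged_dp_variable_min : Prop := ∀ (total_blocks : Int) (minimum_block_size : Int), Dom_dp_variable_min total_blocks minimum_block_size → Pre_dp_variable_min total_blocks minimum_block_size → Spec_dp_variable_min total_blocks minimum_block_size (dp_variable_min total_blocks minimum_block_size)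
def Claim_changed_dp_variable_min : Prop := Dom_dp_variable_min (pvDiffWitness_dp_variable_min.1) (pvDiffWitness_dp_variable_min.2) ∧ Pre_dp_variable_min (pvDiffWitness_dp_variable_min.1) (pvDiffWitness_dp_variable_min.2) ∧ D_dp_variable_min (pvDiffWitness_dp_variable_min.1) (pvDiffWitness_dp_variable_min.2) ∧ dp_variable_min (pvDiffWitness_dp_variable_min.1) (pvDiffWitness_dp_variable_min.2) = pvDiffWitnessOut_dp_variable_min.1 ∧ dp_variable_min_alt (pvDiffWitness_dp_variable_min.1) (pvDiffWitness_dp_variable_min.2) = pvDiffWitnessOut_dp_variable_min.2 ∧ pvDiffWitnessOut_dp_variable_min.1 ≠ pvDiffWitnessOut_dp_variable_min.2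
def Claim_exact_dp_variable_min : Prop := ∀ (total_blocks : Int) (minimum_block_size : Int), Dom_dp_variable_min total_blocks minimum_block_size → Pre_dp_variable_min total_blocks minimum_block_size → D_dp_variable_min total_blocks minimum_block_size → dp_variable_min total_blocks minimum_block_size ≠ dp_variable_min_alt total_blocks minimum_block_size

-- ===== LEMMAS AND PROOFS =====

-- spec table: pvT M b = (starts_1, starts_non_1) for length b with minimum block size M
def pvTbl (M : Nat) : Nat → List (Int × Int)
  | 0 => [((0 : Int), (0 : Int))]
  | n + 1 =>
    (pvTbl M n) ++ [if n + 1 < M then ((1 : Int), (0 : Int))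
      else (((pvTbl M n).getD n (0, 0)).1 + ((pvTbl M n).getD n (0, 0)).2,
        1 + (((List.range (n + 2 - M)).map (fun j => ((pvTbl M n).getD j (0, 0)).1)).sum))]

def pvT (M b : Nat) : Int × Int := (pvTbl M b).getD b (0, 0)
def pvEnt (M b : Nat) : List Int := [(pvT M b).1, (pvT M b).2]
def pvFilled (M k : Nat) : List (List Int) := (List.range k).map (pvEnt M)
def pvPadded (M k N : Nat) : List (List Int) := pvFilled M k ++ List.replicate (N - k) []

theorem pvTbl_length (M n : Nat) : (pvTbl M n).length = n + 1 := by
  induction n with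
  | zero => rfl
  | succ n ih => simp [pvTbl, ih]

theorem pvTbl_getD (M : Nat) {b n : Nat} (h : b ≤ n) : (pvTbl M n).getD b (0, 0) = pvT M b := by
  induction n with
  | zero =>
    have hb : b = 0 := by omega
    subst hb; rfl
  | succ n ih =>
    rcases Nat.lt_or_ge b (n + 1) with hb | hb
    · have hlen : b < (pvTbl M n).length := by rw [pvTbl_length]; omega
      rw [pvTbl, List.getD_append _ _ _ _ hlen]
      exact ih (by omega)
    · have hb' : b = n + 1 := by omega
      subst hb'; rfl

theorem pvT_zero (M : Nat) : pvT M 0 = (0, 0) := rfl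

theorem pvT_succ (M n : Nat) : pvT M (n + 1) = (if n + 1 < M then ((1 : Int), (0 : Int))
      else (((pvTbl M n).getD n (0, 0)).1 + ((pvTbl M n).getD n (0, 0)).2,
        1 + (((List.range (n + 2 - M)).map (fun j => ((pvTbl M n).getD j (0, 0)).1)).sum))) := by
  show ((pvTbl M (n + 1)).getD (n + 1) (0, 0)) = _
  rw [pvTbl, List.getD_append_right _ _ _ _ (by rw [pvTbl_length])]
  rw [pvTbl_length]
  simp

theorem pvT_small (M : Nat) {b : Nat} (h0 : 0 < b) (h : b < M) : pvT M b = (1, 0) := by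
  obtain ⟨n, rfl⟩ : ∃ n, b = n + 1 := ⟨b - 1, by omega⟩
  rw [pvT_succ, if_pos h]

theorem pvT_snd_small (M : Nat) {b : Nat} (h : b < M) : (pvT M b).2 = 0 := by
  rcases Nat.eq_zero_or_pos b with h0 | h0
  · subst h0; rfl
  · rw [pvT_small M h0 h]

theorem pvT_ge (M n : Nat) (hM : 1 ≤ M) (h : M ≤ n + 1) :
    pvT M (n + 1) = ((pvT M n).1 + (pvT M n).2,
      1 + ((List.range (n + 2 - M)).map (fun j => (pvT M j).1)).sum) := by
  rw [pvT_succ, if_neg (by omega), pvTbl_getD M (le_refl n)]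
  have hmap : (List.range (n + 2 - M)).map (fun j => ((pvTbl M n).getD j (0, 0)).1)
      = (List.range (n + 2 - M)).map (fun j => (pvT M j).1) := by
    apply List.map_congr_left
    intro j hj
    rw [List.mem_range] at hj
    rw [pvTbl_getD M (by omega)]
  rw [hmap]

theorem pvFilled_succ (M k : Nat) : pvFilled M (k + 1) = pvFilled M k ++ [pvEnt M k] := by
  simp [pvFilled, List.range_succ]

theorem get_prefix (M : Nat) {j b : Nat} (h : j < b) (tail : List (List Int)) :
    PySem.List.pyGet? (pvFilled M b ++ tail) ((j : Nat) : Int) = some (pvEnt M j) := by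
  rw [PySem.List.pyGet?_natCast]
  rw [List.getElem?_append_left (by simp [pvFilled]; omega)]
  simp [pvFilled, h]

theorem get_at (M b : Nat) (x : List Int) (tail : List (List Int)) :
    PySem.List.pyGet? (pvFilled M b ++ (x :: tail)) ((b : Nat) : Int) = some x := by
  rw [PySem.List.pyGet?_natCast]
  rw [List.getElem?_append_right (by simp [pvFilled])]
  simp [pvFilled]

theorem set_at (M b : Nat) (x v : List Int) (tail : List (List Int)) :
    PySem.List.pySetD (pvFilled M b ++ (x :: tail)) ((b : Nat) : Int) v = pvFilled M b ++ (v :: tail) := by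
  rw [PySem.List.pySetD_natCast]
  have hlen : (pvFilled M b).length = b := by simp [pvFilled]
  rw [List.set_append_right _ _ (by omega)]
  rw [hlen, Nat.sub_self]
  rfl

theorem padded_get (M k N : Nat) {j : Nat} (hj : j < k) :
    PySem.List.pyGet? (pvPadded M k N) ((j : Nat) : Int) = some (pvEnt M j) :=
  get_prefix M hj _

theorem padded_get_empty (M k N : Nat) {j : Nat} (hk : k ≤ j) (hj : j < N) :
    PySem.List.pyGet? (pvPadded M k N) ((j : Nat) : Int) = some [] := by
  rw [PySem.List.pyGet?_natCast, pvPadded]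
  rw [List.getElem?_append_right (by simp [pvFilled]; omega)]
  rw [List.getElem?_replicate]
  simp [pvFilled]
  omega

theorem pvEnt_isEmpty (M b : Nat) : (pvEnt M b).isEmpty = false := rfl

theorem padded_length (M k N : Nat) (h : k ≤ N) : (pvPadded M k N).length = N := by
  simp [pvPadded, pvFilled]
  omega

theorem helper_hit (m : Int) (fuel : Nat) (st : List (List Int)) (b : Int) (entry : List Int)
    (h : PySem.List.pyGet? st b = some entry) (hne : entry.isEmpty = false) :
    pvHelperA m (fuel + 1) st b = some (st, entry) := by
  simp [pvHelperA, h, hne]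

theorem sum_conv (F : Nat → Int) (B : Int) : ∀ (k : Nat) (m : Int), m + k = B + 1 →
    ((PySem.List.pyRange m (B + 1) 1).map (fun x => F ((B - x).toNat))).sum
      = ((List.range k).map F).sum := by
  intro k
  induction k with
  | zero =>
    intro m hm
    rw [PySem.List.pyRange_one_eq_nil (by omega)]
    simp
  | succ k ih =>
    intro m hm
    rw [PySem.List.pyRange_one_cons (by omega)]
    simp only [List.map_cons, List.sum_cons]
    rw [ih (m + 1) (by omega)]
    rw [List.range_succ, List.map_append, List.sum_append]
    have hk : (B - m).toNat = k := by omega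
    rw [hk]
    simp [add_comm]

theorem inner_loop (m : Int) (hm : 1 ≤ m) (g : Nat) (b : Nat) (x v : Int) (tail : List (List Int)) :
    ∀ (k : Nat), m + k ≤ (b : Int) + 1 →
    List.foldl (fun acc block => match acc with
      | none => none
      | some st' =>
        match pvHelperA m (g + 1) st' ((b : Int) - block) with
        | none => none
        | some (st'', rb) =>
          match PySem.List.pyGet? st'' ((b : Int)) with
          | none => none
          | some cur => some (PySem.List.pySetD st'' ((b : Int))
              [PySem.List.pyGetD cur 0 0, PySem.List.pyGetD cur 1 0 + PySem.List.pyGetD rb 0 0]))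
      (some (pvFilled m.toNat b ++ ([x, v] :: tail))) (PySem.List.pyRange m (m + (k : Int)) 1)
    = some (pvFilled m.toNat b ++ ([x, v + ((PySem.List.pyRange m (m + (k : Int)) 1).map
        (fun block => (pvT m.toNat ((b : Int) - block).toNat).1)).sum] :: tail)) := by
  intro k
  induction k with
  | zero =>
    intro _
    rw [show m + ((0 : Nat) : Int) = m by simp]
    rw [PySem.List.pyRange_one_eq_nil (le_refl m)]
    simp
  | succ k ih =>
    intro hk
    have hk' : m + (k : Int) ≤ (b : Int) + 1 := by push_cast at hk ⊢; omega
    rw [show m + ((k + 1 : Nat) : Int) = (m + (k : Int)) + 1 by push_cast; ring]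
    rw [PySem.List.pyRange_one_succ_right (by omega)]
    rw [List.foldl_append, List.map_append, List.sum_append]
    rw [ih hk']
    set j : Nat := ((b : Int) - (m + (k : Int))).toNat with hjdef
    have hj : ((j : Nat) : Int) = (b : Int) - (m + (k : Int)) := by
      rw [hjdef]; push_cast at hk ⊢; omega
    have hjb : j < b := by
      have h1 : (0 : Int) < m + (k : Int) := by omega
      omega
    set S := ((PySem.List.pyRange m (m + (k : Int)) 1).map
        (fun block => (pvT m.toNat ((b : Int) - block).toNat).1)).sum with hS
    simp only [List.foldl_cons, List.foldl_nil, List.map_cons, List.map_nil,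
      List.sum_cons, List.sum_nil]
    rw [show (b : Int) - (m + (k : Int)) = ((j : Nat) : Int) from hj.symm]
    rw [helper_hit m g _ _ _ (get_prefix m.toNat hjb ([x, v + S] :: tail)) (pvEnt_isEmpty _ _)]
    simp only [get_at, set_at]
    have g0 : PySem.List.pyGetD ([x, v + S] : List Int) 0 0 = x := rfl
    have g1 : PySem.List.pyGetD ([x, v + S] : List Int) 1 0 = v + S := rfl
    have g2 : PySem.List.pyGetD (pvEnt m.toNat j) 0 0 = (pvT m.toNat j).1 := rfl
    rw [g0, g1, g2]
    rw [add_zero, add_assoc]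
    simp

theorem chain (m : Int) (hm : 1 ≤ m) (N : Nat) (hMN : m.toNat ≤ N) :
    ∀ (b : Nat), m.toNat - 1 ≤ b → b < N → ∀ g : Nat, b - (m.toNat - 1) + 1 ≤ g →
    pvHelperA m g (pvPadded m.toNat m.toNat N) ((b : Nat) : Int)
      = some (pvPadded m.toNat (b + 1) N, pvEnt m.toNat b) := by
  intro b hb1
  induction b, hb1 using Nat.le_induction with
  | base =>
    intro hbN g hg
    obtain ⟨g', rfl⟩ : ∃ g', g = g' + 1 := ⟨g - 1, by omega⟩
    rw [helper_hit m g' _ _ _ (padded_get m.toNat m.toNat N (by omega)) (pvEnt_isEmpty _ _)]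
    rw [show m.toNat - 1 + 1 = m.toNat by omega]
  | succ b hb ih =>
    intro hbN g hg
    obtain ⟨g'', rfl⟩ : ∃ g'', g = g'' + 1 + 1 := ⟨g - 2, by omega⟩
    have h1 : PySem.List.pyGet? (pvPadded m.toNat m.toNat N) ((b + 1 : Nat) : Int) = some [] :=
      padded_get_empty m.toNat m.toNat N (by omega) hbN
    have h2 : ((b + 1 : Nat) : Int) - 1 = ((b : Nat) : Int) := by push_cast; ring
    have h3 := ih (by omega) (g'' + 1) (by omega)
    have hrep : List.replicate (N - (b + 1)) ([] : List Int)
        = [] :: List.replicate (N - (b + 2)) [] := by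
      rw [show N - (b + 1) = (N - (b + 2)) + 1 by omega, List.replicate_succ]
    set x : Int := PySem.List.pyGetD (pvEnt m.toNat b) 0 0 + PySem.List.pyGetD (pvEnt m.toNat b) 1 0 with hx
    have hset : PySem.List.pySetD (pvPadded m.toNat (b + 1) N) ((b + 1 : Nat) : Int) [x, 1]
        = pvFilled m.toNat (b + 1) ++ ([x, 1] :: List.replicate (N - (b + 2)) []) := by
      rw [pvPadded, hrep]
      exact set_at _ _ _ _ _
    set k : Nat := b + 2 - m.toNat with hkdef
    have hk : m + (k : Int) = ((b + 1 : Nat) : Int) + 1 := by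
      have hmM : ((m.toNat : Nat) : Int) = m := Int.toNat_of_nonneg (by omega)
      push_cast
      omega
    have h4 := inner_loop m hm g'' (b + 1) x 1 (List.replicate (N - (b + 2)) []) k (le_of_eq hk)
    rw [pvHelperA]
    rw [h1]
    simp only [List.isEmpty_nil, if_true, h2, h3]
    rw [hset]
    rw [show ((b + 1 : Nat) : Int) + 1 = m + (k : Int) from hk.symm]
    rw [h4]
    simp only [get_at]
    have hsum : ((PySem.List.pyRange m (m + (k : Int)) 1).map
        (fun block => (pvT m.toNat (((b + 1 : Nat) : Int) - block).toNat).1)).sum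
        = ((List.range (b + 2 - m.toNat)).map (fun j => (pvT m.toNat j).1)).sum := by
      rw [hk]
      exact sum_conv (fun j => (pvT m.toNat j).1) ((b + 1 : Nat) : Int) k m (by omega)
    rw [hsum]
    have hent : ([x, 1 + ((List.range (b + 2 - m.toNat)).map (fun j => (pvT m.toNat j).1)).sum] : List Int)
        = pvEnt m.toNat (b + 1) := by
      rw [pvEnt, pvT_ge m.toNat b (by omega) (by omega), hx]
      rfl
    rw [hent]
    have hpad : pvPadded m.toNat (b + 1 + 1) N
        = pvFilled m.toNat (b + 1) ++ (pvEnt m.toNat (b + 1) :: List.replicate (N - (b + 2)) []) := by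
      rw [pvPadded, pvFilled_succ m.toNat (b + 1), List.append_assoc]
      rfl
    rw [hpad]

theorem foldl_append_const {α β : Type} (x : α) : ∀ (l : List β) (init : List α),
    l.foldl (fun acc _ => acc ++ [x]) init = init ++ List.replicate l.length x := by
  intro l
  induction l with
  | nil => intro init; simp
  | cons y l ih => intro init; simp [ih, List.replicate_succ]

theorem init_filled (m : Int) (hm : 1 ≤ m) :
    ([[0, 0]] : List (List Int)) ++ List.replicate (m - 1).toNat [1, 0] = pvFilled m.toNat m.toNat := by
  apply List.ext_getElem
  · simp [pvFilled]
    omega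
  · intro i h1 h2
    have hi : i < m.toNat := by simpa [pvFilled] using h2
    simp only [pvFilled, List.getElem_map, List.getElem_range]
    cases i with
    | zero => rfl
    | succ i =>
      show (([0, 0] : List Int) :: List.replicate (m - 1).toNat [1, 0])[i + 1]'_ = _
      rw [List.getElem_cons_succ, List.getElem_replicate]
      rw [pvEnt, pvT_small m.toNat (Nat.succ_pos i) hi]

theorem a_results2 (m t : Int) (hm : 1 ≤ m) :
    dp_variable_min t m = (match pvHelperA m (t.toNat + 2)
        (pvPadded m.toNat m.toNat (m.toNat + (t - m + 1).toNat)) t with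
      | some (_, e) => e.foldl (· + ·) 0
      | none => 0) := by
  simp only [dp_variable_min]
  rw [foldl_append_const, foldl_append_const]
  rw [PySem.List.length_pyRange_one, PySem.List.length_pyRange_one]
  simp only [sub_zero]
  rw [init_filled m hm]
  have hlen : (((pvFilled m.toNat m.toNat).length : Nat) : Int) = m := by
    simp [pvFilled]
    omega
  rw [hlen]
  rw [show pvPadded m.toNat m.toNat (m.toNat + (t - m + 1).toNat)
      = pvFilled m.toNat m.toNat ++ List.replicate (t - m + 1).toNat [] from by
    rw [pvPadded, show m.toNat + (t - m + 1).toNat - m.toNat = (t - m + 1).toNat by omega]]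

theorem a_char_ge (m t : Int) (hm : 1 ≤ m) (ht : m ≤ t) :
    dp_variable_min t m = (pvT m.toNat t.toNat).1 + (pvT m.toNat t.toNat).2 := by
  rw [a_results2 m t hm]
  set N : Nat := m.toNat + (t - m + 1).toNat with hN
  have harg : pvHelperA m (t.toNat + 2) (pvPadded m.toNat m.toNat N) t
      = some (pvPadded m.toNat (t.toNat + 1) N, pvEnt m.toNat t.toNat) := by
    have hch := chain m hm N (by omega) t.toNat (by omega) (by omega) (t.toNat + 2) (by omega)
    rwa [Int.toNat_of_nonneg (show (0 : Int) ≤ t by omega)] at hch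
  rw [harg]
  show List.foldl (· + ·) 0 (pvEnt m.toNat t.toNat) = _
  simp [pvEnt]

theorem a_char_mid (m t : Int) (hm : 1 ≤ m) (ht0 : 0 ≤ t) (ht : t < m) :
    dp_variable_min t m = (pvT m.toNat t.toNat).1 + (pvT m.toNat t.toNat).2 := by
  rw [a_results2 m t hm]
  set N : Nat := m.toNat + (t - m + 1).toNat with hN
  have hget : PySem.List.pyGet? (pvPadded m.toNat m.toNat N) t = some (pvEnt m.toNat t.toNat) := by
    have := padded_get m.toNat m.toNat N (show t.toNat < m.toNat by omega)
    rwa [Int.toNat_of_nonneg ht0] at this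
  rw [show t.toNat + 2 = (t.toNat + 1) + 1 by omega]
  rw [helper_hit m (t.toNat + 1) _ _ _ hget (pvEnt_isEmpty _ _)]
  show List.foldl (· + ·) 0 (pvEnt m.toNat t.toNat) = _
  simp [pvEnt]

theorem a_char_neg (m t : Int) (hm : 1 ≤ m) (hlo : -m ≤ t) (ht : t < 0) :
    dp_variable_min t m = (pvT m.toNat (m.toNat - (-t).toNat)).1 + (pvT m.toNat (m.toNat - (-t).toNat)).2 := by
  rw [a_results2 m t hm]
  set N : Nat := m.toNat + (t - m + 1).toNat with hN
  have hNM : N = m.toNat := by omega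
  set kk : Nat := (-t).toNat with hkk
  have hlenp : (pvPadded m.toNat m.toNat N).length = N := padded_length _ _ _ (by omega)
  have hget : PySem.List.pyGet? (pvPadded m.toNat m.toNat N) t
      = some (pvEnt m.toNat (m.toNat - kk)) := by
    rw [show t = -((kk : Nat) : Int) by omega]
    rw [PySem.List.pyGet?_neg_natCast _ kk (by omega) (by rw [hlenp]; omega)]
    rw [hlenp, hNM, pvPadded]
    rw [List.getElem?_append_left (by simp [pvFilled]; omega)]
    rw [pvFilled, List.getElem?_map]
    rw [List.getElem?_range (show m.toNat - kk < m.toNat by omega)]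
    rfl
  rw [show t.toNat + 2 = (t.toNat + 1) + 1 by omega]
  rw [helper_hit m (t.toNat + 1) _ _ _ hget (pvEnt_isEmpty _ _)]
  show List.foldl (· + ·) 0 (pvEnt m.toNat (m.toNat - kk)) = _
  simp [pvEnt]

theorem s1_init (m : Int) (hm : 1 ≤ m) :
    ([0] : List Int) ++ List.replicate (m - 1).toNat 1 = (List.range m.toNat).map (fun j => (pvT m.toNat j).1) := by
  apply List.ext_getElem
  · simp
    omega
  · intro i h1 h2
    have hi : i < m.toNat := by simpa using h2
    rw [List.getElem_map, List.getElem_range]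
    cases i with
    | zero => rfl
    | succ i =>
      show ((0 : Int) :: List.replicate (m - 1).toNat 1)[i + 1]'_ = _
      rw [List.getElem_cons_succ, List.getElem_replicate]
      rw [pvT_small m.toNat (Nat.succ_pos i) hi]

theorem getD_s1 (m : Int) (_hm : 1 ≤ m) {n j : Nat} (hj : j < n) :
    PySem.List.pyGetD ((List.range n).map (fun i => (pvT m.toNat i).1)) ((j : Nat) : Int) 0
      = (pvT m.toNat j).1 := by
  rw [PySem.List.pyGetD_natCast]
  rw [List.getD_eq_getElem?_getD, List.getElem?_map, List.getElem?_range hj]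
  rfl

theorem b_loop (m : Int) (hm : 1 ≤ m) : ∀ k : Nat,
    (PySem.List.pyRange m (m + (k : Int)) 1).foldl
      (fun (st : List Int × Int × Int × Int) b =>
        let cur_s1 := st.2.1 + st.2.2.1
        let pref := st.2.2.2 + PySem.List.pyGetD st.1 (b - m) 0
        let cur_sn := 1 + pref
        (st.1 ++ [cur_s1], cur_s1, cur_sn, pref))
      (([0] : List Int) ++ List.replicate (m - 1).toNat 1,
        PySem.List.pyGetD (([0] : List Int) ++ List.replicate (m - 1).toNat 1) (m - 1) 0, 0, 0)
    = ((List.range (m.toNat + k)).map (fun j => (pvT m.toNat j).1),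
        (pvT m.toNat (m.toNat - 1 + k)).1, (pvT m.toNat (m.toNat - 1 + k)).2,
        ((List.range k).map (fun j => (pvT m.toNat j).1)).sum) := by
  intro k
  induction k with
  | zero =>
    rw [show m + ((0 : Nat) : Int) = m by simp]
    rw [PySem.List.pyRange_one_eq_nil (le_refl m)]
    rw [List.foldl_nil, s1_init m hm]
    have e1 : PySem.List.pyGetD ((List.range m.toNat).map (fun j => (pvT m.toNat j).1)) (m - 1) 0
        = (pvT m.toNat (m.toNat - 1)).1 := by
      rw [show m - 1 = ((m.toNat - 1 : Nat) : Int) by omega]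
      exact getD_s1 m hm (by omega)
    rw [e1]
    simp only [Nat.add_zero, List.range_zero, List.map_nil, List.sum_nil]
    rw [pvT_snd_small m.toNat (show m.toNat - 1 < m.toNat by omega)]
  | succ k ih =>
    rw [show m + ((k + 1 : Nat) : Int) = (m + (k : Int)) + 1 by push_cast; ring]
    rw [PySem.List.pyRange_one_succ_right (by omega)]
    rw [List.foldl_append, ih]
    simp only [List.foldl_cons, List.foldl_nil]
    have hidx : PySem.List.pyGetD ((List.range (m.toNat + k)).map (fun j => (pvT m.toNat j).1))
        (m + (k : Int) - m) 0 = (pvT m.toNat k).1 := by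
      rw [show m + (k : Int) - m = ((k : Nat) : Int) by ring]
      exact getD_s1 m hm (by omega)
    rw [hidx]
    have hT := pvT_ge m.toNat (m.toNat - 1 + k) (by omega) (by omega)
    rw [show m.toNat - 1 + k + 1 = m.toNat + k by omega] at hT
    rw [show m.toNat - 1 + k + 2 - m.toNat = k + 1 by omega] at hT
    rw [show m.toNat - 1 + (k + 1) = m.toNat + k by omega]
    rw [hT]
    rw [show m.toNat + (k + 1) = m.toNat + k + 1 by omega]
    rw [List.range_succ, List.map_append]
    simp
    refine ⟨?_, ?_⟩
    · rw [hT]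
    · rw [List.range_succ, List.map_append, List.sum_append]
      simp

theorem b_char_ge (m t : Int) (hm : 1 ≤ m) (ht : m ≤ t) :
    dp_variable_min_alt t m = (pvT m.toNat t.toNat).1 + (pvT m.toNat t.toNat).2 := by
  simp only [dp_variable_min_alt, if_neg (show ¬ t < m by omega)]
  set k : Nat := (t + 1 - m).toNat with hk
  have hub : t + 1 = m + (k : Int) := by omega
  rw [hub, b_loop m hm k]
  dsimp only
  rw [show m.toNat - 1 + k = t.toNat by omega]

-- ===== VERDICT (by name: the statement is the Claim_ definition above) =====
theorem dp_variable_min_spec : Claim_unchanged_dp_variable_min := by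
  intro t m _ hpre
  obtain ⟨hm, hlo⟩ := hpre
  simp only [Spec_dp_variable_min, D_dp_variable_min]
  intro hnd
  by_cases hge : m ≤ t
  · rw [a_char_ge m t hm hge, b_char_ge m t hm hge]
  · by_cases h0 : 0 ≤ t
    · rw [a_char_mid m t hm h0 (by omega)]
      simp only [dp_variable_min_alt, if_pos (show t < m by omega)]
      by_cases ht0 : t = 0
      · subst ht0
        simp [pvT_zero]
      · rw [if_neg ht0]
        rw [pvT_small m.toNat (by omega) (by omega)]
        rfl
    · rw [a_char_neg m t hm hlo (by omega)]
      simp only [dp_variable_min_alt, if_pos (show t < m by omega), if_neg (show ¬ t = 0 by omega)]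
      rw [pvT_small m.toNat (by omega) (by omega)]
      rfl

theorem dp_variable_min_changed : Claim_changed_dp_variable_min := by
  unfold Claim_changed_dp_variable_min
  decide

theorem dp_variable_min_tight : Claim_exact_dp_variable_min := by
  intro t m _ hpre hD
  obtain ⟨hm, hlo⟩ := hpre
  simp only [D_dp_variable_min] at hD
  subst hD
  rw [a_char_neg m (-m) hm (by omega) (by omega)]
  rw [show m.toNat - (-(-m)).toNat = 0 by omega]
  simp only [dp_variable_min_alt, if_pos (show -m < m by omega), if_neg (show ¬ -m = 0 by omega)]
  rw [pvT_zero]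
  norm_num
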